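-- pv_equiv track=rewrite | github.com/Algorithm-bbackgongdan/Almut-2nd | code/seungwookim99/week4/prog_92342.py | solution
-- ===== SOURCE A (Python) =====
-- from itertools import product
--
-- def calc_can_win(ap, lion):
--     # 두 과녁이 주어졌을 때 우승 여부와 점수차 계산
--     score_ap, score_lion = 0, 0
--     for i in range(11):
--         if ap[i] == 0 and lion[i] == 0:
--             continue
--         if ap[i] >= lion[i]:
--             score_ap += 10 - i
--         else:
--             score_lion += 10 - i
--     return (True, score_lion - score_ap) if score_lion > score_ap else (False, 0)
--
-- def calc(case, info, min_shots, n):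
--     lion = [0] * 11
--     for i in range(11):
--         if case[i] == False:
--             continue
--         if min_shots[i] <= n:
--             lion[i] = min_shots[i]
--             n -= min_shots[i]
--     if n > 0:
--         lion[-1] += n
--     can_win, score = calc_can_win(info, lion)
--     return (can_win, score, lion)
--
-- def sort_filtered(L):
--     return sorted(
--         L,
--         key=lambda x: (
--             -x[10],
--             -x[9],
--             -x[8],
--             -x[7],
--             -x[6],
--             -x[5],
--             -x[4],
--             -x[3],
--             -x[2],
--             -x[1],
--             -x[0],
--         ),
--     )
--
-- def solution(n, info):
--     answer = []
--     candidate = []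
--     min_shots = [0] * 11
--     for i in range(11):
--         min_shots[i] = info[i] + 1  # 10-i 점을 얻을 수 있는 최소 화살 수
--
--     for case in product([True, False], repeat=11):
--         # 해당 case에 대해 이길 수 있는 방법, 점수 계산
--         win, score, lion = calc(case, info, min_shots, n)
--         if not win:
--             continue
--         candidate.append((score, lion))
--
--     if len(candidate) == 0:
--         return [-1]
--     candidate = sorted(candidate, key=lambda x: -x[0])  # 점수로 내림차순 정렬
--     max_score = candidate[0][0]
--
--     # 최대점수차로 이길 수 있는 방법들 filter
--     filtered = []
--     for elem in candidate:
--         if elem[0] != max_score: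
--             break
--         filtered.append(elem[1])
--     return sort_filtered(filtered)[0]
-- ===== SOURCE B (Python) =====
-- def solution(n, info):
--     targets = list(info[:11])
--
--     def score_of(lion):
--         diff = 0
--         for i in range(11):
--             if lion[i] > targets[i]:
--                 diff += 10 - i
--             elif targets[i] != 0 or lion[i] != 0:
--                 diff -= 10 - i
--         return diff
--
--     def consider(lion, rem, best):
--         if rem > 0:
--             lion = lion[:10] + [lion[10] + rem]
--         d = score_of(lion)
--         if d <= 0:
--             return best
--         if best is None or d > best[0] or (d == best[0] and lion[::-1] > best[1][::-1]):
--             return (d, lion)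
--         return best
--
--     def dfs(rest, rem, lion, best):
--         if not rest:
--             return consider(lion, rem, best)
--         best = dfs(rest[1:], rem, lion + [0], best)
--         need = rest[0] + 1
--         if need <= rem:
--             best = dfs(rest[1:], rem - need, lion + [need], best)
--         return best
--
--     best = dfs(targets, n, [], None)
--     return best[1] if best is not None else [-1]
-- ===== Notes on version B (the rewrite author's own statement) =====
-- stated objective: alternative
-- what changed: Replaces the 2^11 boolean-case enumeration that builds a candidate list, sorts it twice and take-whiles, by a pruned recursive DFS over the 11 targets that carries a single running best under the (score, reversed-lion lexicographic) order and never sorts.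
import Mathlib
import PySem

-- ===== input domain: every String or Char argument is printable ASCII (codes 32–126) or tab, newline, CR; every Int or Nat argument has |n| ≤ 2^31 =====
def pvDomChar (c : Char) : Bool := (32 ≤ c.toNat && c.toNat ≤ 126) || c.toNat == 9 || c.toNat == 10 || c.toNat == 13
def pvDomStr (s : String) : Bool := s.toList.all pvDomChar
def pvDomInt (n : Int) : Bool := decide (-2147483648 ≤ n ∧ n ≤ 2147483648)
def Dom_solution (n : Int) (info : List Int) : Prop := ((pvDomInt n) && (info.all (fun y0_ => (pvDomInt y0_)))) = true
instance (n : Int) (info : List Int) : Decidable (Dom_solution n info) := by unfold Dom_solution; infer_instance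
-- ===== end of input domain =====

-- B replaces A's 2^11 case enumeration + two sorts by a pruned DFS carrying one running best; equal return value on Pre_.

-- ===== PORT A =====
-- product([True, False], repeat=k), in itertools order (first coordinate varies slowest, True first)
def prodTF : Nat → List (List Bool)
  | 0 => [[]]
  | k + 1 => [true, false].flatMap (fun b => (prodTF k).map (b :: ·))

-- calc_can_win(ap, lion); loop indices 0..10 are nonnegative and in range, so ap[i]/lion[i] is `getD i`
def calcCanWin (ap lion : List Int) : Bool × Int :=
  let s := (List.range 11).foldl (fun (s : Int × Int) i =>
    if ap.getD i 0 = 0 ∧ lion.getD i 0 = 0 then s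
    else if lion.getD i 0 ≤ ap.getD i 0 then (s.1 + (10 - (i : Int)), s.2)
    else (s.1, s.2 + (10 - (i : Int)))) (0, 0)
  if s.1 < s.2 then (true, s.2 - s.1) else (false, 0)

-- calc(case, info, min_shots, n)
def calcA (case : List Bool) (info minShots : List Int) (n : Int) : Bool × Int × List Int :=
  let s := (List.range 11).foldl (fun (s : List Int × Int) i =>
    if case.getD i false = false then s
    else if minShots.getD i 0 ≤ s.2 then (s.1.set i (minShots.getD i 0), s.2 - minShots.getD i 0)
    else s) (List.replicate 11 0, n)
  let lion := if 0 < s.2 then s.1.set 10 (s.1.getD 10 0 + s.2) else s.1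
  let r := calcCanWin info lion
  (r.1, r.2, lion)

-- the loop 'for elem in candidate: if elem[0] != max_score: break; filtered.append(elem[1])'
def filtLoopA (m : Int) : List (Int × List Int) → List (List Int)
  | [] => []
  | e :: t => if e.1 ≠ m then [] else e.2 :: filtLoopA m t

-- sort_filtered's key tuple (-x[10], ..., -x[0]); Python's tuple comparison is the List Int lexicographic order
def sortFilteredKey (x : List Int) : List Int :=
  [-(x.getD 10 0), -(x.getD 9 0), -(x.getD 8 0), -(x.getD 7 0), -(x.getD 6 0), -(x.getD 5 0),
   -(x.getD 4 0), -(x.getD 3 0), -(x.getD 2 0), -(x.getD 1 0), -(x.getD 0 0)]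

def solution (n : Int) (info : List Int) : List Int :=
  -- min_shots[i] = info[i] + 1; info[i] is in range by Pre_solution
  let minShots := (List.range 11).foldl (fun ms i => ms.set i (info.getD i 0 + 1)) (List.replicate 11 0)
  let candidate := (prodTF 11).foldl (fun acc case =>
    let r := calcA case info minShots n
    if r.1 = false then acc else acc ++ [(r.2.1, r.2.2)]) []
  if candidate.length = 0 then [-1]
  else
    let cand := PySem.List.sorted candidate (fun x => -x.1) false
    let maxScore := (cand.getD 0 (0, [])).1       -- candidate[0][0]; nonempty by the branch above
    let filtered := filtLoopA maxScore cand
    (PySem.List.sorted filtered sortFilteredKey false).getD 0 []   -- [0]; nonempty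

-- ===== PORT B =====
-- score_of(lion): the signed margin, in one pass
def scoreOfB (targets lion : List Int) : Int :=
  (List.range 11).foldl (fun d i =>
    if targets.getD i 0 < lion.getD i 0 then d + (10 - (i : Int))
    else if targets.getD i 0 ≠ 0 ∨ lion.getD i 0 ≠ 0 then d - (10 - (i : Int)) else d) 0

-- consider(lion, rem, best)
def considerB (targets lion : List Int) (rem : Int) (best : Option (Int × List Int)) :
    Option (Int × List Int) :=
  let lion := if 0 < rem then lion.take 10 ++ [lion.getD 10 0 + rem] else lion
  let d := scoreOfB targets lion
  if d ≤ 0 then best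
  else match best with
    | none => some (d, lion)
    | some b => if b.1 < d ∨ (d = b.1 ∧ b.2.reverse < lion.reverse) then some (d, lion) else some b

-- dfs(rest, rem, lion, best)
def dfsB (targets : List Int) : List Int → Int → List Int → Option (Int × List Int) → Option (Int × List Int)
  | [], rem, lion, best => considerB targets lion rem best
  | a :: t, rem, lion, best =>
    let best1 := dfsB targets t rem (lion ++ [0]) best
    if a + 1 ≤ rem then dfsB targets t (rem - (a + 1)) (lion ++ [a + 1]) best1 else best1

def solution_alt (n : Int) (info : List Int) : List Int :=
  let targets := info.take 11      -- info[:11]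
  match dfsB targets targets n [] none with
  | none => [-1]
  | some b => b.2

-- ===== PRECONDITION & SPEC =====
-- Pre_ excludes lists with fewer than 11 entries, on which A raises IndexError (info[i]).
def Pre_solution (n : Int) (info : List Int) : Prop := 11 ≤ info.length
instance (n : Int) (info : List Int) : Decidable (Pre_solution n info) := by unfold Pre_solution; infer_instance
def pvWitness_solution : Int × List Int := (1, [0, 0, 0, 0, 0, 0, 0, 0, 0, 0, 0])

def Spec_solution (n : Int) (info : List Int) (out : List Int) : Prop := out = solution_alt n info
instance (n : Int) (info : List Int) (out : List Int) : Decidable (Spec_solution n info out) := by unfold Spec_solution; infer_instance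

-- ===== CLAIM (what is proved, stated in full; the proofs are below) =====
def Claim_equal_solution : Prop := ∀ (n : Int) (info : List Int), Dom_solution n info → Pre_solution n info → Spec_solution n info (solution n info)


-- ===== LEMMAS AND PROOFS =====

-- the greedy assignment a fixed choice vector induces: take target i (spending m_i arrows) iff
-- the bit is set and m_i still fits in the remaining budget
def greedyM : List Bool → List Int → Int → List Int × Int
  | [], _, r => ([], r)
  | _ :: _, [], r => ([], r)
  | b :: bs, m :: ms, r =>
    if b ∧ m ≤ r then
      let p := greedyM bs ms (r - m); (m :: p.1, p.2)
    else
      let p := greedyM bs ms r; (0 :: p.1, p.2)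

-- the strict order both programs maximise: score first, then the reversed lion lexicographically
def ltC (b c : Int × List Int) : Prop := b.1 < c.1 ∨ (c.1 = b.1 ∧ b.2.reverse < c.2.reverse)

def maxStep (best : Option (Int × List Int)) (c : Int × List Int) : Option (Int × List Int) :=
  match best with
  | none => some c
  | some b => if b.1 < c.1 ∨ (c.1 = b.1 ∧ b.2.reverse < c.2.reverse) then some c else some b

-- the candidate a DFS leaf (lion, rem) yields: leftover arrows onto target 10, then the margin
def candOf (targets : List Int) (p : List Int × Int) : Int × List Int :=
  let lion := if 0 < p.2 then p.1.take 10 ++ [p.1.getD 10 0 + p.2] else p.1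
  (scoreOfB targets lion, lion)

-- the leaves dfsB visits, in visiting order
def leavesB : List Int → Int → List Int → List (List Int × Int)
  | [], rem, lion => [(lion, rem)]
  | a :: t, rem, lion =>
    leavesB t rem (lion ++ [0]) ++ (if a + 1 ≤ rem then leavesB t (rem - (a + 1)) (lion ++ [a + 1]) else [])

lemma ltC_trans {a b c : Int × List Int} (h1 : ltC a b) (h2 : ltC b c) : ltC a c := by
  unfold ltC at *
  rcases h1 with h1 | ⟨h1, h1'⟩ <;> rcases h2 with h2 | ⟨h2, h2'⟩
  · exact Or.inl (h1.trans h2)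
  · exact Or.inl (h2 ▸ h1)
  · exact Or.inl (h1 ▸ h2)
  · exact Or.inr ⟨h2.trans h1, h1'.trans h2'⟩

lemma ltC_eq_of_not {a b : Int × List Int} (h1 : ¬ ltC a b) (h2 : ¬ ltC b a) : a = b := by
  unfold ltC at *
  push_neg at h1 h2
  have he : a.1 = b.1 := le_antisymm h2.1 h1.1
  have : a.2.reverse = b.2.reverse := le_antisymm (h2.2 he) (h1.2 he.symm)
  exact Prod.ext he (List.reverse_injective this)

lemma mem_prodTF {k : Nat} {bs : List Bool} : bs ∈ prodTF k ↔ bs.length = k := by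
  induction k generalizing bs with
  | zero => simp [prodTF, List.length_eq_zero_iff]
  | succ k ih =>
    simp only [prodTF, List.mem_flatMap, List.mem_map]
    constructor
    · rintro ⟨b, _, t, ht, rfl⟩; simp [ih.mp ht]
    · intro h
      match bs with
      | b :: t =>
        refine ⟨b, by cases b <;> simp, t, ih.mpr (by simpa using h), rfl⟩

lemma greedyM_len {bs : List Bool} {ms : List Int} {r : Int} (h : bs.length = ms.length) :
    (greedyM bs ms r).1.length = bs.length := by
  induction bs generalizing ms r with
  | nil => simp [greedyM]
  | cons b t ih =>
    match ms with
    | m :: ms =>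
      simp only [greedyM]
      split <;> simp [ih (by simpa using h)]

lemma mem_leavesB {t : List Int} {rem : Int} {lion₀ : List Int} {p : List Int × Int} :
    p ∈ leavesB t rem lion₀ ↔
      ∃ bs : List Bool, bs.length = t.length ∧
        p = (lion₀ ++ (greedyM bs (t.map (fun a => a + 1)) rem).1,
             (greedyM bs (t.map (fun a => a + 1)) rem).2) := by
  induction t generalizing rem lion₀ with
  | nil =>
    constructor
    · intro h
      refine ⟨[], rfl, ?_⟩
      simp only [leavesB, List.mem_singleton] at h
      simp [h, greedyM]
    · rintro ⟨bs, hbs, rfl⟩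
      rw [List.length_nil, List.length_eq_zero_iff] at hbs
      subst hbs
      simp [leavesB, greedyM]
  | cons a t ih =>
    simp only [leavesB, List.mem_append]
    constructor
    · rintro (h | h)
      · obtain ⟨bs, hbs, rfl⟩ := ih.mp h
        refine ⟨false :: bs, by simp [hbs], ?_⟩
        simp [greedyM, List.append_assoc]
      · by_cases hr : a + 1 ≤ rem
        · rw [if_pos hr] at h
          obtain ⟨bs, hbs, rfl⟩ := ih.mp h
          refine ⟨true :: bs, by simp [hbs], ?_⟩
          simp [greedyM, hr, List.append_assoc]
        · rw [if_neg hr] at h; simp at h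
    · rintro ⟨bs, hbs, rfl⟩
      match bs with
      | b :: bs =>
        have hlen : bs.length = t.length := by simpa using hbs
        by_cases hba : b = true ∧ a + 1 ≤ rem
        · right
          rw [if_pos hba.2]
          apply ih.mpr
          refine ⟨bs, hlen, ?_⟩
          simp [greedyM, hba, List.append_assoc]
        · left
          apply ih.mpr
          refine ⟨bs, hlen, ?_⟩
          have : ¬ (b = true ∧ a + 1 ≤ rem) := hba
          simp only [greedyM, List.map_cons, if_neg this]
          simp [List.append_assoc]

lemma dfsB_eq_fold (targets : List Int) :
    ∀ (t : List Int) (rem : Int) (lion : List Int) (best : Option (Int × List Int)),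
      dfsB targets t rem lion best
        = (leavesB t rem lion).foldl (fun b p => considerB targets p.1 p.2 b) best := by
  intro t
  induction t with
  | nil => intro rem lion best; simp [dfsB, leavesB]
  | cons a t ih =>
    intro rem lion best
    simp only [dfsB, leavesB, List.foldl_append]
    split
    · rw [ih, ih]
    · simp [ih]

lemma considerB_eq (targets l : List Int) (r : Int) (b : Option (Int × List Int)) :
    considerB targets l r b
      = (if (candOf targets (l, r)).1 ≤ 0 then b else maxStep b (candOf targets (l, r))) := by
  rfl

lemma foldl_skip_filter :
    ∀ (L : List (Int × List Int)) (init : Option (Int × List Int)),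
      L.foldl (fun b c => if c.1 ≤ 0 then b else maxStep b c) init
        = (L.filter (fun c => decide (0 < c.1))).foldl maxStep init := by
  intro L
  induction L with
  | nil => intro init; rfl
  | cons c t ih =>
    intro init
    by_cases h : c.1 ≤ 0
    · rw [List.foldl_cons, if_pos h, List.filter_cons, if_neg (by simpa using h), ih]
    · rw [List.foldl_cons, if_neg h, List.filter_cons, if_pos (by simp; omega), ih, List.foldl_cons]

lemma ltC_tri (a b : Int × List Int) : ltC a b ∨ a = b ∨ ltC b a := by
  unfold ltC
  rcases lt_trichotomy a.1 b.1 with h | h | h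
  · exact Or.inl (Or.inl h)
  · rcases lt_trichotomy a.2.reverse b.2.reverse with h2 | h2 | h2
    · exact Or.inl (Or.inr ⟨h.symm, h2⟩)
    · exact Or.inr (Or.inl (Prod.ext h (List.reverse_injective h2)))
    · exact Or.inr (Or.inr (Or.inr ⟨h, h2⟩))
  · exact Or.inr (Or.inr (Or.inl h))

lemma foldl_maxStep_some :
    ∀ (L : List (Int × List Int)) (b : Int × List Int),
      ∃ m, L.foldl maxStep (some b) = some m ∧ (m = b ∨ m ∈ L) ∧ ¬ ltC m b ∧ ∀ c ∈ L, ¬ ltC m c := by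
  intro L
  induction L with
  | nil => intro b; exact ⟨b, rfl, Or.inl rfl, fun h => by simp [ltC] at h, by simp⟩
  | cons c t ih =>
    intro b
    rw [List.foldl_cons]
    by_cases h : ltC b c
    · have h' := h; unfold ltC at h'
      have : maxStep (some b) c = some c := by
        simp only [maxStep]; rw [if_pos h']
      rw [this]
      obtain ⟨m, hm, hmem, hnb, hall⟩ := ih c
      refine ⟨m, hm, ?_, ?_, ?_⟩
      · rcases hmem with rfl | hm2
        · exact Or.inr (by simp)
        · exact Or.inr (by simp [hm2])
      · intro hlt; exact hnb (ltC_trans hlt h)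
      · intro x hx
        rcases hx with _ | hx
        · exact hnb
        · exact hall x (by assumption)
    · have h' : ¬ (b.1 < c.1 ∨ (c.1 = b.1 ∧ b.2.reverse < c.2.reverse)) := h
      have : maxStep (some b) c = some b := by
        simp only [maxStep]; rw [if_neg h']
      rw [this]
      obtain ⟨m, hm, hmem, hnb, hall⟩ := ih b
      refine ⟨m, hm, ?_, hnb, ?_⟩
      · rcases hmem with rfl | hm2
        · exact Or.inl rfl
        · exact Or.inr (by simp [hm2])
      · intro x hx
        rcases hx with _ | hx
        · intro hlt
          rcases ltC_tri c b with hcb | rfl | hbc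
          · exact hnb (ltC_trans hlt hcb)
          · exact hnb hlt
          · exact h hbc
        · exact hall x (by assumption)

lemma foldl_maxStep_none {L : List (Int × List Int)} :
    L.foldl maxStep none = none ↔ L = [] := by
  cases L with
  | nil => simp
  | cons c t =>
    simp only [List.foldl_cons]
    have : maxStep none c = some c := rfl
    rw [this]
    obtain ⟨m, hm, -⟩ := foldl_maxStep_some t c
    simp [hm]

lemma foldl_maxStep_isMax {L : List (Int × List Int)} {m : Int × List Int}
    (h : L.foldl maxStep none = some m) : m ∈ L ∧ ∀ c ∈ L, ¬ ltC m c := by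
  cases L with
  | nil => simp at h
  | cons c t =>
    rw [List.foldl_cons] at h
    have hs : maxStep none c = some c := rfl
    rw [hs] at h
    obtain ⟨m', hm', hmem, hnb, hall⟩ := foldl_maxStep_some t c
    rw [hm'] at h
    cases h
    constructor
    · rcases hmem with rfl | hm2
      · simp
      · simp [hm2]
    · intro x hx
      rcases hx with _ | hx
      · exact hnb
      · exact hall x (by assumption)

-- fold_diff

lemma fold_diff (ap tgt lion : List Int) :
    ∀ (l : List Nat) (sa sl : Int), (∀ i ∈ l, ap.getD i 0 = tgt.getD i 0) →
      (l.foldl (fun d i =>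
          if tgt.getD i 0 < lion.getD i 0 then d + (10 - (i : Int))
          else if tgt.getD i 0 ≠ 0 ∨ lion.getD i 0 ≠ 0 then d - (10 - (i : Int)) else d) (sl - sa))
        = (l.foldl (fun (s : Int × Int) i =>
            if ap.getD i 0 = 0 ∧ lion.getD i 0 = 0 then s
            else if lion.getD i 0 ≤ ap.getD i 0 then (s.1 + (10 - (i : Int)), s.2)
            else (s.1, s.2 + (10 - (i : Int)))) (sa, sl)).2
          - (l.foldl (fun (s : Int × Int) i =>
            if ap.getD i 0 = 0 ∧ lion.getD i 0 = 0 then s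
            else if lion.getD i 0 ≤ ap.getD i 0 then (s.1 + (10 - (i : Int)), s.2)
            else (s.1, s.2 + (10 - (i : Int)))) (sa, sl)).1 := by
  intro l
  induction l with
  | nil => intro sa sl h; simp
  | cons i t ih =>
    intro sa sl h
    have hi : ap.getD i 0 = tgt.getD i 0 := h i (by simp)
    rw [List.foldl_cons, List.foldl_cons]
    have hrest : ∀ j ∈ t, ap.getD j 0 = tgt.getD j 0 := fun j hj => h j (by simp [hj])
    by_cases h0 : ap.getD i 0 = 0 ∧ lion.getD i 0 = 0
    · rw [if_pos h0, if_neg (by omega), if_neg (by push_neg; omega)]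
      exact ih sa sl hrest
    · rw [if_neg h0]
      by_cases hle : lion.getD i 0 ≤ ap.getD i 0
      · rw [if_pos hle, if_neg (by omega), if_pos (by push_neg at h0; omega)]
        have : sl - sa - (10 - (i : Int)) = sl - (sa + (10 - (i : Int))) := by ring
        rw [this]
        exact ih _ _ hrest
      · rw [if_neg hle, if_pos (by omega)]
        have : sl - sa + (10 - (i : Int)) = (sl + (10 - (i : Int))) - sa := by ring
        rw [this]
        exact ih _ _ hrest

lemma canwin_eq {ap tgt : List Int} (lion : List Int)
    (h : ∀ i < 11, ap.getD i 0 = tgt.getD i 0) :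
    calcCanWin ap lion
      = (decide (0 < scoreOfB tgt lion), if 0 < scoreOfB tgt lion then scoreOfB tgt lion else 0) := by
  have hm : ∀ i ∈ List.range 11, ap.getD i 0 = tgt.getD i 0 := by
    intro i hi; exact h i (List.mem_range.mp hi)
  have key := fold_diff ap tgt lion (List.range 11) 0 0 hm
  rw [sub_zero] at key
  unfold calcCanWin scoreOfB
  rw [key]
  set s := (List.range 11).foldl (fun (s : Int × Int) i =>
    if ap.getD i 0 = 0 ∧ lion.getD i 0 = 0 then s
    else if lion.getD i 0 ≤ ap.getD i 0 then (s.1 + (10 - (i : Int)), s.2)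
    else (s.1, s.2 + (10 - (i : Int)))) ((0 : Int), (0 : Int)) with hs
  by_cases hlt : s.1 < s.2
  · have h1 : (0:Int) < s.2 - s.1 := by omega
    rw [if_pos hlt, if_pos h1]
    simp; omega
  · have h1 : ¬ (0:Int) < s.2 - s.1 := by omega
    rw [if_neg hlt, if_neg h1]
    simp; omega

lemma loopA_gen (cs : List Bool) (ms : List Int) (hlen : cs.length = ms.length) :
    ∀ (k : Nat) (done : List Int) (r : Int), done.length + k = cs.length →
      (List.range' done.length k).foldl (fun (s : List Int × Int) i =>
          if cs.getD i false = false then s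
          else if ms.getD i 0 ≤ s.2 then (s.1.set i (ms.getD i 0), s.2 - ms.getD i 0)
          else s) (done ++ List.replicate k 0, r)
        = (done ++ (greedyM (cs.drop done.length) (ms.drop done.length) r).1,
           (greedyM (cs.drop done.length) (ms.drop done.length) r).2) := by
  intro k
  induction k with
  | zero =>
    intro done r hk
    rw [Nat.add_zero] at hk
    rw [List.drop_eq_nil_of_le (le_of_eq hk.symm), List.drop_eq_nil_of_le (by omega)]
    simp [greedyM]
  | succ k ih =>
    intro done r hk
    have hic : done.length < cs.length := by omega
    have him : done.length < ms.length := by omega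
    have hcs : cs.drop done.length = cs[done.length] :: cs.drop (done.length + 1) :=
      List.drop_eq_getElem_cons hic
    have hms : ms.drop done.length = ms[done.length] :: ms.drop (done.length + 1) :=
      List.drop_eq_getElem_cons him
    rw [List.range'_succ, List.foldl_cons]
    rw [List.getD_eq_getElem cs false hic, List.getD_eq_getElem ms 0 him]
    have hrep : List.replicate (k + 1) (0 : Int) = 0 :: List.replicate k 0 := rfl
    by_cases hb : cs[done.length] = false
    · rw [if_pos hb]
      have h1 : done ++ List.replicate (k+1) (0:Int) = (done ++ [0]) ++ List.replicate k 0 := by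
        rw [hrep, List.append_assoc]; rfl
      rw [h1]
      have h2 := ih (done ++ [0]) r (by simp; omega)
      rw [List.length_append, List.length_singleton] at h2
      rw [h2, hcs, hms]
      have hg : greedyM (cs[done.length] :: cs.drop (done.length + 1)) (ms[done.length] :: ms.drop (done.length + 1)) r
          = (0 :: (greedyM (cs.drop (done.length+1)) (ms.drop (done.length+1)) r).1,
             (greedyM (cs.drop (done.length+1)) (ms.drop (done.length+1)) r).2) := by
        simp only [greedyM, hb]
        rw [if_neg (fun hc => Bool.false_ne_true hc.1)]
      rw [hg]
      simp [List.append_assoc]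
    · rw [if_neg hb]
      rw [Bool.not_eq_false] at hb
      by_cases hr : ms[done.length] ≤ r
      · rw [if_pos hr]
        have hset : (done ++ List.replicate (k+1) (0:Int)).set done.length ms[done.length]
            = (done ++ [ms[done.length]]) ++ List.replicate k 0 := by
          rw [List.set_append_right _ _ (le_refl _), Nat.sub_self, hrep]
          simp [List.append_assoc]
        rw [hset]
        have h2 := ih (done ++ [ms[done.length]]) (r - ms[done.length]) (by simp; omega)
        rw [List.length_append, List.length_singleton] at h2
        rw [h2, hcs, hms]
        have hg : greedyM (cs[done.length] :: cs.drop (done.length + 1)) (ms[done.length] :: ms.drop (done.length + 1)) r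
            = (ms[done.length] :: (greedyM (cs.drop (done.length+1)) (ms.drop (done.length+1)) (r - ms[done.length])).1,
               (greedyM (cs.drop (done.length+1)) (ms.drop (done.length+1)) (r - ms[done.length])).2) := by
          simp only [greedyM]
          rw [if_pos ⟨hb, hr⟩]
        rw [hg]
        simp [List.append_assoc]
      · rw [if_neg hr]
        have h1 : done ++ List.replicate (k+1) (0:Int) = (done ++ [0]) ++ List.replicate k 0 := by
          rw [hrep, List.append_assoc]; rfl
        rw [h1]
        have h2 := ih (done ++ [0]) r (by simp; omega)
        rw [List.length_append, List.length_singleton] at h2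
        rw [h2, hcs, hms]
        have hg : greedyM (cs[done.length] :: cs.drop (done.length + 1)) (ms[done.length] :: ms.drop (done.length + 1)) r
            = (0 :: (greedyM (cs.drop (done.length+1)) (ms.drop (done.length+1)) r).1,
               (greedyM (cs.drop (done.length+1)) (ms.drop (done.length+1)) r).2) := by
          simp only [greedyM]
          rw [if_neg (by rintro ⟨-, h⟩; exact hr h)]
        rw [hg]
        simp [List.append_assoc]

lemma msEq {info : List Int} (h : 11 ≤ info.length) :
    (List.range 11).foldl (fun ms i => ms.set i (info.getD i 0 + 1)) (List.replicate 11 0)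
      = (info.take 11).map (fun a => a + 1) := by
  have hlit : (List.range 11).foldl (fun ms i => ms.set i (info.getD i 0 + 1)) (List.replicate 11 0)
      = [info.getD 0 0 + 1, info.getD 1 0 + 1, info.getD 2 0 + 1, info.getD 3 0 + 1,
         info.getD 4 0 + 1, info.getD 5 0 + 1, info.getD 6 0 + 1, info.getD 7 0 + 1,
         info.getD 8 0 + 1, info.getD 9 0 + 1, info.getD 10 0 + 1] := rfl
  rw [hlit]
  apply List.ext_getElem
  · simp; omega
  · intro i h1 h2
    have hi : i < 11 := by simpa using h1
    have hti : i < (info.take 11).length := by simp; omega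
    have hii : i < info.length := by omega
    rw [List.getElem_map, List.getElem_take]
    interval_cases i <;> simp [List.getD, List.getElem?_eq_getElem hii]

lemma set10_eq {l : List Int} (h : l.length = 11) (v : Int) :
    l.set 10 v = l.take 10 ++ [v] := by
  have := List.set_eq_take_append_cons_drop (l := l) (i := 10) (a := v)
  rw [this, if_pos (by omega)]
  have : l.drop 11 = [] := List.drop_eq_nil_of_le (by omega)
  simp [this]

lemma getD_take11 {info : List Int} (h : 11 ≤ info.length) {i : Nat} (hi : i < 11) :
    info.getD i 0 = (info.take 11).getD i 0 := by
  have h1 : i < info.length := by omega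
  have h2 : i < (info.take 11).length := by simp; omega
  rw [List.getD_eq_getElem _ _ h1, List.getD_eq_getElem _ _ h2, List.getElem_take]

lemma calcA_char {info : List Int} (hPre : 11 ≤ info.length) {case : List Bool}
    (hc : case.length = 11) (n : Int) :
    calcA case info ((info.take 11).map (fun a => a + 1)) n
      = (decide (0 < (candOf (info.take 11) (greedyM case ((info.take 11).map (fun a => a + 1)) n)).1),
         (if 0 < (candOf (info.take 11) (greedyM case ((info.take 11).map (fun a => a + 1)) n)).1
          then (candOf (info.take 11) (greedyM case ((info.take 11).map (fun a => a + 1)) n)).1 else 0),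
         (candOf (info.take 11) (greedyM case ((info.take 11).map (fun a => a + 1)) n)).2) := by
  set tg := info.take 11 with htg
  set ms := tg.map (fun a => a + 1) with hms
  have htglen : tg.length = 11 := by rw [htg]; simp; omega
  have hmslen : ms.length = 11 := by rw [hms]; simp [htglen]
  have hlen : case.length = ms.length := by omega
  set p := greedyM case ms n with hp
  have hploop := loopA_gen case ms hlen 11 [] n (by simp [hc])
  rw [List.length_nil, List.drop_zero, List.drop_zero, List.nil_append, List.nil_append] at hploop
  have hp1len : p.1.length = 11 := by rw [hp, greedyM_len hlen, hc]
  unfold calcA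
  rw [← List.range_eq_range'] at hploop
  have hlion : (if 0 < p.2 then p.1.set 10 (p.1.getD 10 0 + p.2) else p.1)
      = (candOf tg p).2 := by
    unfold candOf
    by_cases h2 : 0 < p.2
    · rw [if_pos h2, if_pos h2, set10_eq hp1len]
    · rw [if_neg h2, if_neg h2]
  have hcw : calcCanWin info (candOf tg p).2
      = (decide (0 < scoreOfB tg (candOf tg p).2),
         if 0 < scoreOfB tg (candOf tg p).2 then scoreOfB tg (candOf tg p).2 else 0) := by
    apply canwin_eq
    intro i hi
    exact getD_take11 hPre hi
  have hsc : (candOf tg p).1 = scoreOfB tg (candOf tg p).2 := rfl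
  rw [hploop, ← hp]
  dsimp only
  rw [hlion, hcw, ← hsc]


lemma filtLoop_eq (M : Int) :
    ∀ (s : List (Int × List Int)), s.Pairwise (fun a b => -a.1 ≤ -b.1) →
      (∀ c ∈ s, c.1 ≤ M) →
      filtLoopA M s = (s.filter (fun c => decide (c.1 = M))).map (fun c => c.2) := by
  intro s
  induction s with
  | nil => intro _ _; rfl
  | cons c t ih =>
    intro hp hb
    rw [List.pairwise_cons] at hp
    by_cases hc : c.1 = M
    · rw [List.filter_cons, if_pos (by simp [hc])]
      simp only [filtLoopA, if_neg (show ¬ (c.1 ≠ M) from fun hn => hn hc), List.map_cons]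
      rw [ih hp.2 (fun x hx => hb x (by simp [hx]))]
    · simp only [filtLoopA, if_pos hc]
      have : t.filter (fun x => decide (x.1 = M)) = [] := by
        rw [List.filter_eq_nil_iff]
        intro x hx
        have h1 : -c.1 ≤ -x.1 := hp.1 x hx
        have h2 : c.1 ≤ M := hb c (by simp)
        simp only [decide_eq_true_eq]
        omega
      rw [List.filter_cons, if_neg (by simpa using hc), this]
      rfl

lemma negmap_lt {a b : List Int} (h : a.length = b.length) :
    a.map (fun v => -v) < b.map (fun v => -v) ↔ b < a := by
  induction a generalizing b with
  | nil =>
    have : b = [] := by simpa using List.length_eq_zero_iff.mp h.symm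
    subst this; simp
  | cons x t ih =>
    match b with
    | y :: s =>
      have hl : t.length = s.length := by simpa using h
      simp only [List.map_cons, List.cons_lt_cons_iff, ih hl]
      constructor
      · rintro (h1 | ⟨h1, h2⟩)
        · exact Or.inl (by omega)
        · exact Or.inr ⟨by omega, h2⟩
      · rintro (h1 | ⟨h1, h2⟩)
        · exact Or.inl (by omega)
        · exact Or.inr ⟨by omega, h2⟩


lemma sortKey_eq {x : List Int} (h : x.length = 11) :
    sortFilteredKey x = x.reverse.map (fun v => -v) := by
  apply List.ext_getElem
  · simp [sortFilteredKey, h]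
  · intro i h1 h2
    have hi : i < 11 := by simpa [sortFilteredKey] using h1
    have hrl : x.reverse.length = 11 := by simp [h]
    rw [List.getElem_map]
    rw [List.getElem_reverse]
    interval_cases i <;>
      simp [sortFilteredKey, h]

lemma sortedInst (l : List (List Int)) (k : List Int → List Int) :
    @PySem.List.sorted (List Int) (List Int) List.instLT (fun a b => a.decidableLT b) l k false
    = @PySem.List.sorted (List Int) (List Int) List.instLinearOrder.toLT LinearOrder.toDecidableLT l k false := by
  congr 1

lemma A_sel {cand : List (Int × List Int)} {m : Int × List Int}
    (hne : cand ≠ [])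
    (hmem : m ∈ cand) (hmax : ∀ c ∈ cand, ¬ ltC m c)
    (hlen : ∀ c ∈ cand, c.2.length = 11) :
    (let s := PySem.List.sorted cand (fun x => -x.1) false
     let maxScore := (s.getD 0 (0, [])).1
     let filtered := filtLoopA maxScore s
     (PySem.List.sorted filtered sortFilteredKey false).getD 0 []) = m.2 := by
  dsimp only
  set s := PySem.List.sorted cand (fun x => -x.1) false with hs
  have hsne : s ≠ [] := by
    rw [hs, Ne, PySem.List.sorted_eq_nil_iff]; exact hne
  obtain ⟨c0, t, hst⟩ := List.exists_cons_of_ne_nil hsne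
  have hst' : PySem.List.sorted cand (fun x => -x.1) false = c0 :: t := by rw [← hs]; exact hst
  have hbound : ∀ y ∈ cand, y.1 ≤ c0.1 := by
    intro y hy
    have := PySem.List.key_head_sorted_le cand (fun x => -x.1) hst' y hy
    dsimp only at this
    omega
  have hpw : s.Pairwise (fun a b => -a.1 ≤ -b.1) := by
    rw [hs]; exact PySem.List.sorted_pairwise cand (fun x => -x.1)
  have hmax0 : (s.getD 0 (0, ([] : List Int))).1 = c0.1 := by rw [hst]; rfl
  rw [hmax0]
  have hmemS : ∀ c, c ∈ s ↔ c ∈ cand := by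
    intro c; rw [hs]; exact PySem.List.mem_sorted cand (fun x => -x.1) false c
  have hfilt : filtLoopA c0.1 s
      = (s.filter (fun c => decide (c.1 = c0.1))).map (fun c => c.2) := by
    apply filtLoop_eq c0.1 s hpw
    intro c hc; exact hbound c ((hmemS c).mp hc)
  rw [hfilt]
  set filtered := (s.filter (fun c => decide (c.1 = c0.1))).map (fun c => c.2) with hf
  have hc0s : c0 ∈ s := by rw [hst]; simp
  have hfne : filtered ≠ [] := by
    have : c0.2 ∈ filtered := by
      rw [hf]
      exact List.mem_map_of_mem (List.mem_filter.mpr ⟨hc0s, by simp⟩)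
    exact List.ne_nil_of_mem this
  have hs2ne : PySem.List.sorted filtered sortFilteredKey false ≠ [] := by
    intro hnil
    exact hfne ((PySem.List.sorted_eq_nil_iff _ _ _).mp hnil)
  obtain ⟨m2, t2, hst2⟩ := List.exists_cons_of_ne_nil hs2ne
  rw [hst2]
  have hst2' := hst2
  rw [sortedInst] at hst2'
  have hm2mem : m2 ∈ filtered := by
    have hhead : m2 ∈ PySem.List.sorted filtered sortFilteredKey false := by rw [hst2]; simp
    exact ((PySem.List.sorted_perm filtered sortFilteredKey false).mem_iff).mp hhead
  obtain ⟨c, hcf, hc2⟩ := List.mem_map.mp (hf ▸ hm2mem)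
  obtain ⟨hcs, hcscore⟩ := List.mem_filter.mp hcf
  have hcscore : c.1 = c0.1 := by simpa using hcscore
  have hccand : c ∈ cand := (hmemS c).mp hcs
  have hkey := PySem.List.key_head_sorted_le filtered sortFilteredKey hst2'

  have hmc : m = c := by
    apply ltC_eq_of_not (hmax c hccand)
    intro hlt
    rcases hlt with hlt | ⟨heq, hrev⟩
    · have := hbound m hmem; omega
    · -- m has the max score: its lion is in filtered, so m2's key is ≤ its key
      have hmS : m ∈ s := (hmemS m).mpr hmem
      have hmf : m.2 ∈ filtered := by
        rw [hf]
        exact List.mem_map_of_mem (List.mem_filter.mpr ⟨hmS, by simp [heq, hcscore]⟩)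
      have hk := hkey m.2 hmf
      have hnlt := not_lt_of_ge hk
      have hl2 : m2.length = 11 := hc2 ▸ hlen c hccand
      have hlm : m.2.length = 11 := hlen m hmem
      rw [hc2] at hrev
      have hlt2 : sortFilteredKey m.2 < sortFilteredKey m2 := by
        rw [sortKey_eq hlm, sortKey_eq hl2]
        exact (negmap_lt (by simp [hl2, hlm])).mpr hrev
      exact hnlt hlt2
  rw [hmc, hc2]
  rfl


lemma candOf_len {targets : List Int} {p : List Int × Int} (h : p.1.length = 11) :
    (candOf targets p).2.length = 11 := by
  unfold candOf
  by_cases h2 : 0 < p.2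
  · rw [if_pos h2]; simp [h]
  · rw [if_neg h2]; exact h

lemma candidate_eq (info ms : List Int) (n : Int) :
    (prodTF 11).foldl (fun acc case =>
        if (calcA case info ms n).1 = false then acc
        else acc ++ [((calcA case info ms n).2.1, (calcA case info ms n).2.2)]) []
      = ((prodTF 11).filter (fun case => (calcA case info ms n).1)).map
          (fun case => ((calcA case info ms n).2.1, (calcA case info ms n).2.2)) := by
  have h1 : (prodTF 11).foldl (fun acc case =>
        if (calcA case info ms n).1 = false then acc
        else acc ++ [((calcA case info ms n).2.1, (calcA case info ms n).2.2)]) []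
      = (prodTF 11).foldl (fun acc case =>
        if (calcA case info ms n).1 then acc ++ [((calcA case info ms n).2.1, (calcA case info ms n).2.2)] else acc) [] := by
    apply PySem.List.foldl_congr_mem
    intro acc case _
    cases hb : (calcA case info ms n).1 <;> simp [hb]
  rw [h1, PySem.List.foldl_append_if]
  rfl

-- ===== VERDICT (by name: the statement is the Claim_ definition above) =====
theorem solution_spec : Claim_equal_solution := by
  intro n info _hdom hpre
  unfold Spec_solution
  have hPre : 11 ≤ info.length := hpre
  have htglen : (info.take 11).length = 11 := by simp; omega
  set tg := info.take 11 with htg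
  set ms := tg.map (fun a => a + 1) with hms
  have hmslen : ms.length = 11 := by rw [hms]; simp [htglen]
  set L := leavesB tg n [] with hL
  set WB := (L.map (candOf tg)).filter (fun c => decide (0 < c.1)) with hWB
  -- B-side: the DFS is the running max over the winning leaf candidates
  have hBfold : dfsB tg tg n [] none = WB.foldl maxStep none := by
    rw [dfsB_eq_fold]
    have hfun : (fun (b : Option (Int × List Int)) (p : List Int × Int) => considerB tg p.1 p.2 b)
        = fun b p => if (candOf tg p).1 ≤ 0 then b else maxStep b (candOf tg p) := by
      funext b p
      exact considerB_eq tg p.1 p.2 b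
    rw [← hL, hfun]
    rw [show L.foldl (fun b p => if (candOf tg p).1 ≤ 0 then b else maxStep b (candOf tg p)) none
        = (L.map (candOf tg)).foldl (fun b c => if c.1 ≤ 0 then b else maxStep b c) none from
      (List.foldl_map (f := candOf tg)
        (g := fun b c => if c.1 ≤ 0 then b else maxStep b c) (l := L) (init := none)).symm]
    rw [foldl_skip_filter, ← hWB]
  have hmemB : ∀ c, c ∈ WB ↔
      (0 < c.1 ∧ ∃ bs : List Bool, bs.length = 11 ∧ c = candOf tg (greedyM bs ms n)) := by
    intro c
    rw [hWB, List.mem_filter]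
    simp only [List.mem_map, hL, decide_eq_true_eq]
    constructor
    · rintro ⟨⟨p, hp, rfl⟩, hpos⟩
      obtain ⟨bs, hbs, rfl⟩ := mem_leavesB.mp hp
      refine ⟨hpos, bs, by rw [hbs]; exact htglen, ?_⟩
      simp [← hms]
    · rintro ⟨hpos, bs, hbs, rfl⟩
      refine ⟨⟨greedyM bs ms n, mem_leavesB.mpr ⟨bs, by rw [hbs, htglen], ?_⟩, rfl⟩, hpos⟩
      simp [← hms]
  -- A-side
  unfold solution
  rw [msEq hPre, ← htg, ← hms]
  dsimp only
  rw [candidate_eq]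
  set C := ((prodTF 11).filter (fun case => (calcA case info ms n).1)).map
      (fun case => ((calcA case info ms n).2.1, (calcA case info ms n).2.2)) with hC
  have hmemA : ∀ c, c ∈ C ↔
      (0 < c.1 ∧ ∃ bs : List Bool, bs.length = 11 ∧ c = candOf tg (greedyM bs ms n)) := by
    intro c
    rw [hC, List.mem_map]
    constructor
    · rintro ⟨case, hcase, rfl⟩
      obtain ⟨hmemP, hwin⟩ := List.mem_filter.mp hcase
      have hlen11 : case.length = 11 := mem_prodTF.mp hmemP
      have hchar := calcA_char hPre hlen11 n
      rw [← htg, ← hms] at hchar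
      rw [hchar] at hwin ⊢
      have hpos : 0 < (candOf tg (greedyM case ms n)).1 := by simpa using hwin
      refine ⟨by simpa [hpos] using hpos, case, hlen11, ?_⟩
      simp [hpos]
    · rintro ⟨hpos, bs, hbs, rfl⟩
      refine ⟨bs, List.mem_filter.mpr ⟨mem_prodTF.mpr hbs, ?_⟩, ?_⟩
      · have hchar := calcA_char hPre hbs n
        rw [← htg, ← hms] at hchar
        rw [hchar]
        simpa using hpos
      · have hchar := calcA_char hPre hbs n
        rw [← htg, ← hms] at hchar
        rw [hchar]
        simp [hpos]
  have hiff : ∀ c, c ∈ C ↔ c ∈ WB := fun c => (hmemA c).trans (hmemB c).symm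
  -- lengths of all candidate lions
  have hlenC : ∀ c ∈ C, c.2.length = 11 := by
    intro c hc
    obtain ⟨-, bs, hbs, rfl⟩ := (hmemA c).mp hc
    exact candOf_len (by rw [greedyM_len (by rw [hbs, hmslen]), hbs])
  -- B-side final shape
  unfold solution_alt
  rw [← htg]
  dsimp only
  rw [hBfold]
  rcases hfold : WB.foldl maxStep none with - | m
  · -- no winning candidate on either side
    have hWBnil : WB = [] := foldl_maxStep_none.mp hfold
    have hCnil : C = [] := by
      rw [List.eq_nil_iff_forall_not_mem]
      intro c hc
      have := (hiff c).mp hc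
      rw [hWBnil] at this
      simp at this
    rw [if_pos (by rw [hCnil]; rfl)]
  · -- a best candidate exists; both sides return its lion
    obtain ⟨hmMem, hmMax⟩ := foldl_maxStep_isMax hfold
    have hmC : m ∈ C := (hiff m).mpr hmMem
    have hCne : C ≠ [] := List.ne_nil_of_mem hmC
    rw [if_neg (by simpa using hCne)]
    exact A_sel hCne hmC (fun c hc => hmMax c ((hiff c).mp hc)) hlenC
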